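-- pv_equiv track=rewrite | github.com/fastnlp/fastNLP | fastNLP/models/char_language_model.py | get_char_dict
-- ===== SOURCE A (Python) =====
-- def get_char_dict(vocabulary):
--     char_dict = dict()
--     count = 1
--     for word in vocabulary:
--         for ch in word:
--             if ch not in char_dict:
--                 char_dict[ch] = count
--                 count += 1
--     return char_dict
-- ===== SOURCE B (Python) =====
-- def get_char_dict(vocabulary):
--     # Different algorithm: scan the joined character stream BACKWARDS, overwriting,
--     # so each char's stored value ends up as its first-occurrence position; then
--     # sort the distinct chars by that position and number them from 1.
--     stream = ''.join(vocabulary)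
--     n = len(stream)
--     first = {}
--     for j, ch in enumerate(reversed(stream)):
--         first[ch] = n - 1 - j
--     chars = sorted(first, key=first.get)
--     return {ch: i for i, ch in enumerate(chars, 1)}
-- ===== Notes on version B (the rewrite author's own statement) =====
-- stated objective: alternative
-- what changed: A does a single forward pass with a membership test and a manual counter; B instead scans the joined character stream backwards with plain overwriting (no membership branch) so each char's stored value becomes its first-occurrence index, then sorts the distinct chars by that index and numbers them from 1.
import Mathlib
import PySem

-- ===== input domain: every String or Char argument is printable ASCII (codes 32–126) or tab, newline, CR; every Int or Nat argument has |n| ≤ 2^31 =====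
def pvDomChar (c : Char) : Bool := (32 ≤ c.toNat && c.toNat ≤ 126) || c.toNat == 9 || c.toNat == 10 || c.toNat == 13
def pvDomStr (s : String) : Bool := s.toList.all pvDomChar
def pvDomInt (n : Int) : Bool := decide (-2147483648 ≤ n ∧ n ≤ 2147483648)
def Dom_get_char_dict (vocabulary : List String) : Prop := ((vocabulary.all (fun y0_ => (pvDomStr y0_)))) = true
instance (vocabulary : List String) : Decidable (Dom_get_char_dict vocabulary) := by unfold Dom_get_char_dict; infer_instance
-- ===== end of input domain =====

-- B uses a different algorithm: instead of A's forward pass with a membership test and a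
-- manual counter, B scans the joined character stream BACKWARDS with plain dict overwriting
-- (so each char's stored value ends up as its first-occurrence index), then sorts the
-- distinct chars by that index and numbers them from 1 (objective: alternative).

-- ===== PORT A =====
def get_char_dict (vocabulary : List String) : List (String × Int) :=
  let st := vocabulary.foldl
    (fun (st : PySem.Dict String Int × Int) word =>
      word.toList.foldl
        (fun (st : PySem.Dict String Int × Int) ch =>
          let s := String.singleton ch
          if ¬ (st.1.contains s) then (st.1.insert s st.2, st.2 + 1) else st)
        st)
    (PySem.Dict.empty, 1)
  st.1.items

-- ===== PORT B =====
def get_char_dict_alt (vocabulary : List String) : List (String × Int) :=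
  let stream : List Char := (vocabulary.map String.toList).flatten   -- ''.join(vocabulary), as chars
  let n : Int := stream.length
  let first : PySem.Dict String Int :=
    (PySem.List.enumerate stream.reverse 0).foldl
      (fun d p => d.insert (String.singleton p.2) (n - 1 - p.1)) PySem.Dict.empty
  -- sorted(first, key=first.get): every argument is a key of `first`, so first.get ch = first.getD ch 0 here
  let chars := PySem.List.sorted first.keys (fun c => first.getD c 0) false
  (PySem.List.enumerate chars 1).map (fun p => (p.2, p.1))

-- ===== PRECONDITION & SPEC =====
def Spec_get_char_dict (vocabulary : List String) (out : List (String × Int)) : Prop := out = get_char_dict_alt vocabulary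
instance (vocabulary : List String) (out : List (String × Int)) : Decidable (Spec_get_char_dict vocabulary out) := by unfold Spec_get_char_dict; infer_instance

-- ===== CLAIM (what is proved, stated in full; the proofs are below) =====
def Claim_equal_get_char_dict : Prop := ∀ (vocabulary : List String), Dom_get_char_dict vocabulary → Spec_get_char_dict vocabulary (get_char_dict vocabulary)

-- ===== LEMMAS AND PROOFS =====

theorem pv_singleton_inj {x y : Char} (h : String.singleton x = String.singleton y) : x = y := by
  have := congrArg String.toList h
  simpa using this

-- ---------- A side: the loop state is the enumerated seen-so-far list ----------

def pvState (seen : List String) : PySem.Dict String Int × Int :=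
  (PySem.Dict.mk ((PySem.List.enumerate seen 1).map (fun p => (p.2, p.1))), (seen.length : Int) + 1)

theorem pv_any_enum (s : String) (ys : List String) (t : Int) :
    (PySem.List.enumerate ys t).any (fun p => p.2 == s) = ys.any (fun x => x == s) := by
  induction ys generalizing t with
  | nil => simp [PySem.List.enumerate]
  | cons y ys ih => simp [PySem.List.enumerate, ih]

theorem pv_contains_state (seen : List String) (s : String) :
    (pvState seen).1.contains s = seen.any (fun x => x == s) := by
  simp only [pvState, PySem.Dict.contains, List.any_map, Function.comp_def]
  exact pv_any_enum s seen 1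

theorem pv_step (seen : List String) (ch : String) :
    (if ¬ ((pvState seen).1.contains ch)
      then ((pvState seen).1.insert ch (pvState seen).2, (pvState seen).2 + 1)
      else pvState seen)
    = pvState (PySem.Set.add seen ch) := by
  by_cases hm : ch ∈ seen
  · have hc : (pvState seen).1.contains ch = true := by
      rw [pv_contains_state]; simp [hm]
    rw [show PySem.Set.add seen ch = seen from by simp [PySem.Set.add, hm]]
    rw [if_neg (fun h => h hc)]
  · have hc : (pvState seen).1.contains ch = false := by
      rw [pv_contains_state]
      simp only [List.any_eq_false, beq_iff_eq]
      intro x hx he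
      exact hm (he ▸ hx)
    have hset : PySem.Set.add seen ch = seen ++ [ch] := by
      simp [PySem.Set.add, PySem.Set.contains, hm]
    rw [hset]
    unfold PySem.Dict.insert
    simp only [pvState] at hc
    simp only [pvState, PySem.List.enumerate_append, List.map_append,
      List.length_append, List.length_cons, List.length_nil, hc]
    push_cast
    ring_nf
    simp

theorem pv_foldl_state (cs : List String) (seen : List String) :
    cs.foldl
      (fun (st : PySem.Dict String Int × Int) s =>
        if ¬ (st.1.contains s) then (st.1.insert s st.2, st.2 + 1) else st)
      (pvState seen)
    = pvState (cs.foldl PySem.Set.add seen) := by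
  induction cs generalizing seen with
  | nil => rfl
  | cons c cs ih => simp only [List.foldl_cons, pv_step, ih]

theorem pv_foldl_flatMap {α β γ : Type} (l : List α) (f : α → List β)
    (g : γ → β → γ) (init : γ) :
    (l.flatMap f).foldl g init = l.foldl (fun acc x => (f x).foldl g acc) init := by
  induction l generalizing init with
  | nil => rfl
  | cons x xs ih => simp [List.flatMap_cons, List.foldl_append, ih]

-- ---------- B side ----------

theorem pv_get_fold (l : List Char) (s n : Int) (d : PySem.Dict String Int) (x : Char) :
    ((PySem.List.enumerate l.reverse s).foldl
        (fun d p => d.insert (String.singleton p.2) (n - 1 - p.1)) d).get? (String.singleton x)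
      = if x ∈ l then some (n - 1 - (s + (l.length : Int) - 1 - (l.idxOf x : Int)))
        else d.get? (String.singleton x) := by
  induction l generalizing d with
  | nil => simp
  | cons c t ih =>
    rw [List.reverse_cons, PySem.List.enumerate_append, List.foldl_append]
    simp only [List.length_reverse, PySem.List.enumerate_cons, PySem.List.enumerate_nil,
      List.foldl_cons, List.foldl_nil]
    rw [PySem.Dict.get?_insert]
    by_cases hx : x = c
    · subst hx
      simp [List.idxOf_cons_self]
      ring_nf
    · have hne : String.singleton x ≠ String.singleton c := by
        intro h
        exact hx (by have := congrArg String.toList h; simpa using this)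
      rw [if_neg hne, ih]
      by_cases hmem : x ∈ t
      · rw [if_pos hmem, if_pos (List.mem_cons_of_mem _ hmem)]
        rw [List.idxOf_cons_ne _ (by exact fun h => hx h.symm)]
        simp only [List.length_cons]
        push_cast
        ring_nf
      · rw [if_neg hmem, if_neg (by simp [hx, hmem])]

theorem pv_mem_map_singleton (acc : List Char) (c : Char) :
    (String.singleton c ∈ acc.map String.singleton) ↔ c ∈ acc := by
  constructor
  · intro h
    obtain ⟨a, ha, he⟩ := List.mem_map.1 h
    rwa [← pv_singleton_inj he]
  · exact fun h => List.mem_map_of_mem h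

theorem pv_dedup_map_aux (l : List Char) (acc : List Char) :
    (l.map String.singleton).foldl PySem.Set.add (acc.map String.singleton)
      = (l.foldl PySem.Set.add acc).map String.singleton := by
  induction l generalizing acc with
  | nil => rfl
  | cons c t ih =>
    simp only [List.map_cons, List.foldl_cons]
    rw [show PySem.Set.add (acc.map String.singleton) (String.singleton c)
          = (PySem.Set.add acc c).map String.singleton from ?_]
    · exact ih _
    · by_cases hc : c ∈ acc
      · simp [PySem.Set.add, PySem.Set.contains, hc, pv_mem_map_singleton]
      · simp [PySem.Set.add, PySem.Set.contains, hc, pv_mem_map_singleton]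

theorem pv_dedup_map (l : List Char) :
    PySem.List.dedup (l.map String.singleton) = (PySem.List.dedup l).map String.singleton := by
  simp only [PySem.List.dedup_eq_ofList, PySem.Set.ofList_eq_foldl]
  simpa using pv_dedup_map_aux l []

-- fold add skips elements already in acc
theorem pv_add_filter (t : List Char) (acc : List Char) (c : Char) (hc : c ∈ acc) :
    t.foldl PySem.Set.add acc = (t.filter (fun x => !(x == c))).foldl PySem.Set.add acc := by
  induction t generalizing acc with
  | nil => rfl
  | cons x t ih =>
    by_cases hx : x = c
    · subst hx
      have : PySem.Set.add acc x = acc := by simp [PySem.Set.add, PySem.Set.contains, hc]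
      simp [this, ih acc hc]
    · have hmem : c ∈ PySem.Set.add acc x := by
        simp [PySem.Set.add]
        split <;> simp [hc]
      simp only [List.filter_cons]
      rw [if_pos (by simp [hx])]
      simp only [List.foldl_cons]
      exact ih _ hmem

-- pull a fresh head out of the fold accumulator
theorem pv_add_cons (t : List Char) (acc : List Char) (c : Char) (hc : c ∉ t) :
    t.foldl PySem.Set.add (c :: acc) = c :: t.foldl PySem.Set.add acc := by
  induction t generalizing acc with
  | nil => rfl
  | cons x t ih =>
    have hxc : x ≠ c := fun h => hc (h ▸ List.mem_cons_self)
    have : PySem.Set.add (c :: acc) x = c :: PySem.Set.add acc x := by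
      simp only [PySem.Set.add, PySem.Set.contains]
      by_cases hx : x ∈ acc
      · simp [hx, hxc]
      · simp [hx, hxc]
    simp only [List.foldl_cons, this]
    exact ih _ (fun h => hc (List.mem_cons_of_mem _ h))

theorem pv_dedup_cons (c : Char) (t : List Char) :
    PySem.List.dedup (c :: t) = c :: PySem.List.dedup (t.filter (fun x => !(x == c))) := by
  simp only [PySem.List.dedup_eq_ofList, PySem.Set.ofList_eq_foldl, List.foldl_cons]
  have h0 : PySem.Set.add ([] : List Char) c = [c] := rfl
  rw [h0, pv_add_filter t [c] c List.mem_cons_self,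
    show ([c] : List Char) = c :: [] from rfl,
    pv_add_cons _ _ _ (by simp)]

-- idxOf is order-monotone under filter
theorem pv_idx_filter (t : List Char) (p : Char → Bool) (a b : Char)
    (ha : a ∈ t.filter p) (hb : b ∈ t.filter p)
    (h : (t.filter p).idxOf a < (t.filter p).idxOf b) : t.idxOf a < t.idxOf b := by
  induction t with
  | nil => simp at ha
  | cons c t ih =>
    by_cases hac : a = c
    · subst hac
      have hba : b ≠ a := by
        intro he; subst he; exact lt_irrefl _ h
      rw [List.idxOf_cons_self]
      rw [List.idxOf_cons_ne _ (fun he => hba he.symm)]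
      exact Nat.succ_pos _
    · by_cases hbc : b = c
      · subst hbc
        exfalso
        by_cases hp : p b
        · rw [List.filter_cons, if_pos hp, List.idxOf_cons_self] at h
          exact Nat.not_lt_zero _ h
        · rw [List.filter_cons, if_neg (by simpa using hp)] at hb
          exact hp (List.of_mem_filter hb)
      · rw [List.idxOf_cons_ne _ (fun he => hac he.symm),
          List.idxOf_cons_ne _ (fun he => hbc he.symm)]
        by_cases hp : p c
        · rw [List.filter_cons, if_pos hp] at ha hb h
          rw [List.idxOf_cons_ne _ (fun he => hac he.symm),
            List.idxOf_cons_ne _ (fun he => hbc he.symm)] at h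
          have := ih (by simpa [hac] using ha) (by simpa [hbc] using hb) (by omega)
          omega
        · rw [List.filter_cons, if_neg (by simpa using hp)] at ha hb h
          have := ih ha hb h
          omega

-- first-occurrence dedup is strictly increasing in first-occurrence position
theorem pv_pairwise_idx (l : List Char) :
    (PySem.List.dedup l).Pairwise (fun a b => l.idxOf a < l.idxOf b) := by
  induction hn : l.length using Nat.strong_induction_on generalizing l with
  | _ n ih =>
    match l, hn with
    | [], _ => simp [PySem.List.dedup_eq_ofList, PySem.Set.ofList]
    | c :: t, hn =>
      rw [pv_dedup_cons]
      refine List.Pairwise.cons ?_ ?_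
      · intro b hb
        have hbf : b ∈ t.filter (fun x => !(x == c)) := by
          have := (PySem.List.mem_dedup _ _).1 hb
          exact this
        have hbc : b ≠ c := by simpa using List.of_mem_filter hbf
        rw [List.idxOf_cons_self, List.idxOf_cons_ne _ (fun he => hbc he.symm)]
        exact Nat.succ_pos _
      · have hlen : (t.filter (fun x => !(x == c))).length < n := by
          subst hn
          simp only [List.length_cons]
          exact Nat.lt_succ_of_le (List.length_filter_le _ _)
        have hp := ih _ hlen (t.filter (fun x => !(x == c))) rfl
        refine List.Pairwise.imp_of_mem ?_ hp
        intro a b ha hb hab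
        have haf := (PySem.List.mem_dedup _ _).1 ha
        have hbf := (PySem.List.mem_dedup _ _).1 hb
        have hac : a ≠ c := by simpa using List.of_mem_filter haf
        have hbc : b ≠ c := by simpa using List.of_mem_filter hbf
        rw [List.idxOf_cons_ne _ (fun he => hac he.symm),
          List.idxOf_cons_ne _ (fun he => hbc he.symm)]
        have := pv_idx_filter t _ a b haf hbf hab
        omega

-- ===== VERDICT (by name: the statement is the Claim_ definition above) =====
theorem get_char_dict_spec : Claim_equal_get_char_dict := by
  intro vocabulary _
  show _ = _
  unfold get_char_dict get_char_dict_alt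
  simp only []
  -- name the character stream and its singleton-string image
  set S : List Char := (vocabulary.map String.toList).flatten with hS
  set cs : List String := S.map String.singleton with hcs
  -- ---- A's side: the loop over words is the loop over all singleton chars ----
  have hflat : vocabulary.flatMap (fun w => w.toList.map (fun c => String.singleton c)) = cs := by
    simp [hcs, hS, List.flatMap_def, List.map_flatten, List.map_map, Function.comp_def]
  have hA : (vocabulary.foldl
      (fun (st : PySem.Dict String Int × Int) word =>
        word.toList.foldl
          (fun (st : PySem.Dict String Int × Int) ch =>
            let s := String.singleton ch
            if ¬ (st.1.contains s) then (st.1.insert s st.2, st.2 + 1) else st)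
          st)
      (PySem.Dict.empty, 1))
      = pvState (PySem.List.dedup cs) := by
    rw [show (vocabulary.foldl
        (fun (st : PySem.Dict String Int × Int) word =>
          word.toList.foldl
            (fun (st : PySem.Dict String Int × Int) ch =>
              let s := String.singleton ch
              if ¬ (st.1.contains s) then (st.1.insert s st.2, st.2 + 1) else st)
            st)
        (PySem.Dict.empty, 1))
      = (vocabulary.flatMap (fun w => w.toList.map (fun c => String.singleton c))).foldl
          (fun (st : PySem.Dict String Int × Int) s =>
            if ¬ (st.1.contains s) then (st.1.insert s st.2, st.2 + 1) else st)
          (PySem.Dict.empty, 1) from by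
      rw [pv_foldl_flatMap]
      simp [List.foldl_map]]
    rw [hflat]
    have h0 : (PySem.Dict.empty (κ := String) (ν := Int), (1 : Int)) = pvState [] := by
      simp [pvState, PySem.Dict.empty, PySem.List.enumerate]
    rw [h0, pv_foldl_state]
    simp [PySem.List.dedup_eq_ofList, PySem.Set.ofList_eq_foldl]
  rw [hA]
  -- ---- B's side ----
  -- the dict built by the backwards loop
  set first : PySem.Dict String Int :=
    (PySem.List.enumerate S.reverse 0).foldl
      (fun d p => d.insert (String.singleton p.2) (((S.length : Int)) - 1 - p.1))
      PySem.Dict.empty with hfirst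
  -- its keys: the distinct singleton chars (in reversed-stream first-occurrence order)
  have hkeys : first.keys = PySem.List.dedup cs.reverse := by
    rw [hfirst, PySem.Dict.keys_foldl_insert_key (key := fun p : Int × Char => String.singleton p.2)
      (f := fun _ p => ((S.length : Int)) - 1 - p.1)]
    rw [show (fun p : Int × Char => String.singleton p.2)
          = (String.singleton ∘ (fun p : Int × Char => p.2)) from rfl, ← List.map_map,
      PySem.List.map_snd_enumerate]
    simp [PySem.Set.update, PySem.Set.ofList_eq_foldl, PySem.List.dedup_eq_ofList, hcs,
      List.map_reverse]
  -- the stored value of a seen char is its first-occurrence position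
  have hval : ∀ x : Char, x ∈ S → first.getD (String.singleton x) 0 = (S.idxOf x : Int) := by
    intro x hx
    rw [PySem.Dict.getD_eq_get?_getD, hfirst, pv_get_fold, if_pos hx]
    have : (S.length : Int) - 1 - (0 + (S.length : Int) - 1 - (S.idxOf x : Int))
        = (S.idxOf x : Int) := by ring
    rw [this]
    rfl
  -- the sort recovers first-occurrence order
  have hsorted : PySem.List.sorted first.keys (fun c => first.getD c 0) false
      = PySem.List.dedup cs := by
    apply PySem.List.sorted_eq_of_perm_of_pairwise_lt
    · -- same distinct elements, both without duplicates
      rw [hkeys]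
      refine (List.perm_ext_iff_of_nodup (PySem.List.nodup_dedup _) (PySem.List.nodup_dedup _)).mpr ?_
      intro a
      rw [PySem.List.mem_dedup, PySem.List.mem_dedup, List.mem_reverse]
    · -- strictly increasing key along the first-occurrence dedup
      rw [hcs, pv_dedup_map, List.pairwise_map]
      refine List.Pairwise.imp_of_mem ?_ (pv_pairwise_idx S)
      intro a b ha hb hab
      have haS : a ∈ S := (PySem.List.mem_dedup _ _).1 ha
      have hbS : b ∈ S := (PySem.List.mem_dedup _ _).1 hb
      rw [hval a haS, hval b hbS]
      exact_mod_cast hab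
  rw [hsorted]
  -- both sides are the enumerated dedup list, keys swapped in front
  rfl
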